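-- pv_equiv track=rewrite | github.com/eungi-aiza/BasicAlgorithm | eunji/230723/22-2_backtrack.py | str_perm
-- ===== SOURCE A (Python) =====
-- def str_perm(s):
--     s = list(s)
--     def bt(s, n):
--         result = []
--
--         if n == 0:
--             return [[]]
--
--         for i, elem in enumerate(s):
--             for next in bt(s[:i] + s[i+1:], n-1):
--                 result += [[elem]+next]
--
--         return result
--
--     ans = []
--     perm = bt(s, 3)
--     for i in range(len(perm)):
--         temp = ""
--         for j in perm[i]:
--             temp += j
--         ans.append(temp)
--     ans = sorted(list(set(ans)))
--     return ans
-- ===== SOURCE B (Python) =====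
-- def str_perm(s):
--     # Count each character once; generate every distinct length-3 arrangement
--     # directly from the remaining multiplicities (no post-hoc set() dedup).
--     counts = {}
--     for ch in s:
--         counts[ch] = counts.get(ch, 0) + 1
--     out = []
--
--     def go(chosen, n):
--         if n == 0:
--             out.append("".join(chosen))
--             return
--         for c in counts:
--             if chosen.count(c) < counts[c]:
--                 go(chosen + [c], n - 1)
--
--     go([], 3)
--     return sorted(out)
-- ===== Notes on version B (the rewrite author's own statement) =====
-- stated objective: faster
-- what changed: Instead of enumerating all ordered position-triples via backtracking over shrinking list slices and deduplicating with set() before sorting, B builds a character-count map once and generates each distinct length-3 arrangement exactly once by checking remaining multiplicities, then sorts.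
import Mathlib
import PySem

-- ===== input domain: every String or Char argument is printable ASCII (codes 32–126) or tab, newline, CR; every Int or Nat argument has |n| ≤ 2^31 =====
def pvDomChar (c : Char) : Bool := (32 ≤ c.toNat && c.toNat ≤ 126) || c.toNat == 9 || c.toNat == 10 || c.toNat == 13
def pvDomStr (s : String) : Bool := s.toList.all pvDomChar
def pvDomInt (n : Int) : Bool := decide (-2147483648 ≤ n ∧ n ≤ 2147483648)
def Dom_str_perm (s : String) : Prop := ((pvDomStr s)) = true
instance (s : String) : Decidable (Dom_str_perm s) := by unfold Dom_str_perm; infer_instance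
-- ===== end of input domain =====

-- B replaces A's positional backtracking + set() dedup with count-based generation of each
-- distinct length-3 arrangement exactly once (objective: faster, in a timing run).
-- Python's 1-char strings (loop elements / '+='-concatenation) are modelled over List Char,
-- exactly as PySem models strings.

-- ===== PORT A =====
-- bt(s, n): backtracking over positions, removing the chosen position by slicing
def btA : List Char → Nat → List (List Char)
  | _, 0 => [[]]
  | l, Nat.succ n =>
    (PySem.List.enumerate l).foldl
      (fun result ie =>
        (btA (PySem.List.slice l none (some ie.1) ++ PySem.List.slice l (some (ie.1 + 1)) none) n).foldl
          (fun result next => result ++ [[ie.2] ++ next]) result)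
      []
  termination_by l n => n

def str_perm (s : String) : List String :=
  let l := s.toList
  let perm := btA l 3
  -- the join loop: temp = ""; for j in perm[i]: temp += j  (1-char strings, over List Char)
  let ans := (PySem.List.pyRange 0 (PySem.List.len perm)).foldl
      (fun ans i =>
        ans ++ [String.ofList ((PySem.List.pyGetD perm i []).foldl (fun temp j => temp ++ [j]) [])])
      []
  PySem.List.sorted (PySem.Set.ofList ans) (fun x => x) false

-- ===== PORT B =====
-- go(chosen, n): pick any character whose multiplicity is not exhausted by `chosen`
def btAlt (cnt : PySem.Dict Char Int) : List Char → Nat → List String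
  | chosen, 0 => [PySem.Str.join "" (chosen.map (fun c => String.ofList [c]))]
  | chosen, Nat.succ n =>
    cnt.keys.flatMap (fun c =>
      if (List.count c chosen : Int) < cnt.getD c 0 then btAlt cnt (chosen ++ [c]) n else [])
  termination_by chosen n => n

def str_perm_alt (s : String) : List String :=
  let counts := s.toList.foldl (fun d ch => d.insert ch (d.getD ch 0 + 1)) PySem.Dict.empty
  PySem.List.sorted (btAlt counts [] 3) (fun x => x) false

-- ===== PRECONDITION & SPEC =====
def Spec_str_perm (s : String) (out : List String) : Prop := out = str_perm_alt s
instance (s : String) (out : List String) : Decidable (Spec_str_perm s out) := by unfold Spec_str_perm; infer_instance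

-- ===== CLAIM (what is proved, stated in full; the proofs are below) =====
def Claim_equal_str_perm : Prop := ∀ (s : String), Dom_str_perm s → Spec_str_perm s (str_perm s)

-- ===== LEMMAS AND PROOFS =====


theorem btA_succ (l : List Char) (n : Nat) :
    btA l (n + 1) = (PySem.List.enumerate l).flatMap (fun ie =>
      (btA (PySem.List.slice l none (some ie.1) ++ PySem.List.slice l (some (ie.1 + 1)) none) n).map
        (fun next => ie.2 :: next)) := by
  rw [btA]
  simp only [PySem.List.foldl_append_eq_flatMap, List.nil_append]
  simp [show ∀ (lst : List (List Char)) (c : Char), lst.flatMap (fun x => [c :: x]) = lst.map (c :: ·) from fun lst c => by induction lst <;> simp_all]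

theorem slice_pair (l : List Char) (k : Nat) :
    PySem.List.slice l none (some ((0 : Int) + k)) ++
      PySem.List.slice l (some (((0 : Int) + k) + 1)) none = l.eraseIdx k := by
  have h1 : ((0 : Int) + k) = ((k : Nat) : Int) := by push_cast; ring
  have h2 : (((k : Nat) : Int) + 1) = (((k + 1 : Nat)) : Int) := by push_cast; ring
  rw [h1, h2, PySem.List.slice_to_natCast, PySem.List.slice_from_natCast,
    List.eraseIdx_eq_take_drop_succ]

theorem btA_mem (n : Nat) (l t : List Char) :
    t ∈ btA l n ↔ t.length = n ∧ t.Subperm l := by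
  induction n generalizing l t with
  | zero =>
    simp only [btA, List.mem_singleton]
    constructor
    · rintro rfl; simp
    · rintro ⟨h, -⟩; exact List.length_eq_zero_iff.mp h
  | succ n ih =>
    rw [btA_succ]
    simp only [List.mem_flatMap, List.mem_map, PySem.List.mem_enumerate_iff]
    constructor
    · rintro ⟨ie, ⟨k, hk, rfl⟩, next, hnext, rfl⟩
      rw [slice_pair] at hnext
      obtain ⟨hlen, hsub⟩ := (ih _ _).mp hnext
      refine ⟨by simp [hlen], ?_⟩
      have h1 : (l[k] :: next).Subperm (l[k] :: l.eraseIdx k) := (List.subperm_cons _).mpr hsub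
      have h2 : (l[k] :: l.eraseIdx k).Perm l := by
        refine List.Perm.trans (List.Perm.cons _ (List.erase_getElem hk).symm) ?_
        exact (List.perm_cons_erase (l.getElem_mem hk)).symm
      exact h1.trans h2.subperm
    · rintro ⟨hlen, hsub⟩
      match t with
      | [] => simp at hlen
      | c :: rest =>
        have hc : c ∈ l := hsub.subset (List.mem_cons_self ..)
        have hk : l.idxOf c < l.length := List.idxOf_lt_length_of_mem hc
        have hgk : l[l.idxOf c] = c := List.getElem_idxOf hk
        refine ⟨(0 + (l.idxOf c : Int), l[l.idxOf c]), ⟨l.idxOf c, hk, rfl⟩, rest, ?_, by rw [hgk]⟩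
        rw [slice_pair]
        refine (ih _ _).mpr ⟨by simpa using hlen, ?_⟩
        have h3 : rest.Subperm (l.erase c) := by
          have := (List.perm_cons_erase hc).subperm_left.mp hsub
          exact (List.subperm_cons _).mp this
        have h4 : (l.erase c).Perm (l.eraseIdx (l.idxOf c)) := by
          conv_lhs => rw [← hgk]
          exact List.erase_getElem hk
        exact h4.subperm_left.mp h3

-- ===== PRECONDITION & SPEC =====


def joinStr (cs : List Char) : String :=
  PySem.Str.join "" (cs.map (fun c => String.ofList [c]))

theorem joinStr_toList (cs : List Char) : (joinStr cs).toList = cs := by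
  simp only [joinStr, PySem.Str.toList_join, List.map_map]
  have : (String.toList ∘ fun c => String.ofList [c]) = fun c : Char => [c] := by
    funext c; simp
  rw [this]
  simpa using PySem.Chars.join_nil_singletons cs

theorem joinStr_inj {a b : List Char} (h : joinStr a = joinStr b) : a = b := by
  have := congrArg String.toList h
  simpa [joinStr_toList] using this

theorem btAlt_shape (n : Nat) (cnt : PySem.Dict Char Int) (chosen : List Char) (t : String) :
    t ∈ btAlt cnt chosen n → ∃ u : List Char, u.length = n ∧ t = joinStr (chosen ++ u) := by
  induction n generalizing chosen with
  | zero =>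
    rintro h
    simp only [btAlt, List.mem_singleton] at h
    exact ⟨[], rfl, by simpa [joinStr] using h⟩
  | succ n ih =>
    rw [btAlt]
    simp only [List.mem_flatMap]
    rintro ⟨c, -, hmem⟩
    split at hmem
    · obtain ⟨u, hlen, rfl⟩ := ih _ hmem
      exact ⟨c :: u, by simp [hlen], by simp⟩
    · simp at hmem

theorem btAlt_mem (l : List Char) (n : Nat) (chosen : List Char)
    (h : ∀ c, chosen.count c ≤ l.count c) (t : String) :
    t ∈ btAlt (PySem.Dict.counter l) chosen n ↔
      ∃ u : List Char, u.length = n ∧ (∀ c, (chosen ++ u).count c ≤ l.count c) ∧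
        t = joinStr (chosen ++ u) := by
  induction n generalizing chosen with
  | zero =>
    simp only [btAlt, List.mem_singleton]
    constructor
    · rintro rfl
      exact ⟨[], rfl, by simpa using h, by simp [joinStr]⟩
    · rintro ⟨u, hu, -, rfl⟩
      rw [List.length_eq_zero_iff.mp hu]
      simp [joinStr]
  | succ n ih =>
    rw [btAlt]
    simp only [List.mem_flatMap]
    constructor
    · rintro ⟨c, -, hmem⟩
      split at hmem
      · rename_i hlt
        rw [PySem.Dict.getD_counter] at hlt
        have hlt' : chosen.count c < l.count c := by exact_mod_cast hlt
        have h' : ∀ x, (chosen ++ [c]).count x ≤ l.count x := by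
          intro x
          rcases eq_or_ne x c with rfl | hx
          · simpa using hlt'
          · simpa [List.count_singleton, hx.symm] using h x
        obtain ⟨u, hlen, hcnt, rfl⟩ := (ih _ h').mp hmem
        refine ⟨c :: u, by simp [hlen], ?_, by simp⟩
        intro x; simpa using hcnt x
      · simp at hmem
    · rintro ⟨u, hlen, hcnt, rfl⟩
      match u, hlen with
      | c :: u', hlen =>
        have hc1 : chosen.count c + 1 ≤ l.count c := by
          have := hcnt c
          simp [List.count_append] at this
          omega
        have hcl : c ∈ l := by
          have : 0 < l.count c := by omega
          exact List.count_pos_iff.mp this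
        refine ⟨c, ?_, ?_⟩
        · rw [PySem.Dict.keys_counter]
          simpa [PySem.Set.mem_ofList] using hcl
        · rw [if_pos (by rw [PySem.Dict.getD_counter]; exact_mod_cast hc1)]
          have h' : ∀ x, (chosen ++ [c]).count x ≤ l.count x := by
            intro x
            rcases eq_or_ne x c with rfl | hx
            · simpa using hc1
            · simpa [List.count_singleton, hx.symm] using h x
          refine (ih _ h').mpr ⟨u', by simpa using hlen, ?_, by simp⟩
          intro x
          have := hcnt x
          simpa [List.count_append, List.count_cons] using this

theorem btAlt_nodup (l : List Char) (n : Nat) (chosen : List Char) :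
    (btAlt (PySem.Dict.counter l) chosen n).Nodup := by
  induction n generalizing chosen with
  | zero => simp [btAlt]
  | succ n ih =>
    rw [btAlt]
    rw [List.nodup_flatMap]
    constructor
    · intro c _
      split
      · exact ih _
      · exact List.nodup_nil
    · have hkeys : (PySem.Dict.counter l).keys.Nodup := by
        rw [PySem.Dict.keys_counter]; exact PySem.Set.nodup_ofList l
      refine hkeys.imp ?_
      intro c c' hne
      intro t htc htc'
      exfalso
      simp only at htc htc'
      have s1 : ∃ u : List Char, t = joinStr (chosen ++ c :: u) := by
        split at htc
        · obtain ⟨u, -, rfl⟩ := btAlt_shape _ _ _ _ htc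
          exact ⟨u, by simp⟩
        · simp at htc
      have s2 : ∃ u : List Char, t = joinStr (chosen ++ c' :: u) := by
        split at htc'
        · obtain ⟨u, -, rfl⟩ := btAlt_shape _ _ _ _ htc'
          exact ⟨u, by simp⟩
        · simp at htc'
      obtain ⟨u, rfl⟩ := s1
      obtain ⟨u', he⟩ := s2
      have := joinStr_inj he
      have := List.append_cancel_left this
      simp at this
      exact hne this.1

theorem joinStr_eq_ofList (cs : List Char) : joinStr cs = String.ofList cs :=
  String.toList_inj.mp (by simp [joinStr_toList])

theorem count_le_iff_subperm (u l : List Char) :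
    (∀ c, u.count c ≤ l.count c) ↔ u.Subperm l := by
  rw [List.subperm_ext_iff]
  exact ⟨fun h x _ => h x, fun h c => by
    by_cases hc : c ∈ u
    · exact h c hc
    · simp [List.count_eq_zero_of_not_mem hc]⟩

theorem ans_eq (perm : List (List Char)) :
    (PySem.List.pyRange 0 (PySem.List.len perm)).foldl
      (fun ans i =>
        ans ++ [String.ofList ((PySem.List.pyGetD perm i []).foldl (fun temp j => temp ++ [j]) [])])
      [] = perm.map String.ofList := by
  rw [PySem.List.foldl_pyRange_pyGetD perm [] (fun ans u => ans ++ [String.ofList (u.foldl (fun temp j => temp ++ [j]) [])]) [] (le_refl 0)]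
  simp only [Int.toNat_zero, List.drop_zero]
  have h1 : ∀ u : List Char, u.foldl (fun temp j => temp ++ [j]) [] = u := by
    intro u
    rw [PySem.List.foldl_append_eq_flatMap (fun j => [j]) u []]
    simp
  simp only [h1]
  rw [PySem.List.foldl_append_eq_flatMap (fun u => [String.ofList u]) perm []]
  simp only [List.nil_append]
  induction perm with
  | nil => rfl
  | cons p ps ihp => simp_all

theorem final (s : String) : str_perm s = str_perm_alt s := by
  unfold str_perm str_perm_alt
  simp only [ans_eq, PySem.Dict.foldl_insert_getD_add_one_eq_counter]
  apply PySem.List.sorted_eq_sorted_of_perm _ _ _ (fun a b h => h)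
  rw [List.perm_ext_iff_of_nodup (PySem.Set.nodup_ofList _) (btAlt_nodup s.toList 3 [])]
  intro x
  rw [PySem.Set.mem_ofList, btAlt_mem s.toList 3 [] (by simp), List.mem_map]
  constructor
  · rintro ⟨t, ht, rfl⟩
    obtain ⟨hlen, hsub⟩ := (btA_mem 3 s.toList t).mp ht
    exact ⟨t, hlen, (count_le_iff_subperm _ _).mpr (by simpa using hsub),
      by simp [joinStr_eq_ofList]⟩
  · rintro ⟨u, hlen, hcnt, rfl⟩
    refine ⟨u, (btA_mem 3 s.toList u).mpr ⟨hlen, ?_⟩, by simp [joinStr_eq_ofList]⟩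
    exact (count_le_iff_subperm _ _).mp hcnt

-- ===== VERDICT (by name: the statement is the Claim_ definition above) =====
theorem str_perm_spec : Claim_equal_str_perm := by
  intro s _
  unfold Spec_str_perm
  exact final s
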